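-- pv_equiv track=rewrite | github.com/jonnivoss/loputoo | paarid/test.py | separate_into_pairs
-- ===== SOURCE A (Python) =====
-- def separate_into_pairs(word):
--     pairs = {}
--     for i in range(len(word) - 1):
--         parr = word[i:i + 2]
--         separate = list(parr)
--         sorr = sorted(separate)
--         pair = ''.join(sorr)
--         if pair in pairs:
--             pairs[pair] += 1
--         else:
--             pairs[pair] = 1
--     return pairs
-- ===== SOURCE B (Python) =====
-- def separate_into_pairs(word):
--     grams = [''.join(sorted(word[i:i + 2])) for i in range(len(word) - 1)]
--     counts = {}
--     prev, run = None, 0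
--     for g in sorted(grams):
--         if g == prev:
--             run += 1
--         else:
--             if prev is not None:
--                 counts[prev] = run
--             prev, run = g, 1
--     if prev is not None:
--         counts[prev] = run
--     return {g: counts[g] for g in dict.fromkeys(grams)}
-- ===== Notes on version B (the rewrite author's own statement) =====
-- stated objective: alternative
-- what changed: B counts by sorting the list of normalized bigrams and run-length-encoding the sorted runs (prev/run scan), then emits each distinct bigram in first-occurrence order with its run count, instead of A's incremental hash counting with a membership branch inside the scan.
import Mathlib
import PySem

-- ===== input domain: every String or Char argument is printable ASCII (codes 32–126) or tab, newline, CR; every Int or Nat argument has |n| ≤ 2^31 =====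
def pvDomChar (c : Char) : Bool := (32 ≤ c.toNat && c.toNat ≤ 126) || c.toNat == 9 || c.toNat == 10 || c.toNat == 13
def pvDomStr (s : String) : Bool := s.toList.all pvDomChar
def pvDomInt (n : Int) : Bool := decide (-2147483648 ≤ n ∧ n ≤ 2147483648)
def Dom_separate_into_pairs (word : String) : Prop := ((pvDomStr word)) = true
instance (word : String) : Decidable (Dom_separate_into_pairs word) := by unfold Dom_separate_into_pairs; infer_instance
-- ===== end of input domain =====

-- B counts the normalized bigrams by sort + run-length scan instead of A's incremental
-- dict counting, then emits the counts in first-occurrence order; objective: alternative.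

-- ===== PORT A =====
def separate_into_pairs (word : String) : List (String × Int) :=
  let pairs :=
    (PySem.List.pyRange 0 ((PySem.Str.len word : Int) - 1) 1).foldl
      (fun pairs i =>
        let parr := PySem.List.slice word.toList (some i) (some (i + 2))
        let separate := parr
        let sorr := PySem.List.sorted separate (fun c => c) false
        let pair := String.ofList sorr
        if pairs.contains pair then pairs.modify pair 0 (· + 1)
        else pairs.insert pair 1)
      PySem.Dict.empty
  pairs.items

-- ===== PORT B =====
-- one step of B's run-length loop over the sorted bigram list: state (counts, prev, run)
def pvRleStep (st : PySem.Dict String Int × Option String × Int) (g : String) :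
    PySem.Dict String Int × Option String × Int :=
  if some g == st.2.1 then (st.1, st.2.1, st.2.2 + 1)
  else
    match st.2.1 with
    | none => (st.1, some g, 1)
    | some p => (st.1.insert p st.2.2, some g, 1)

-- the trailing 'if prev is not None: counts[prev] = run'
def pvRleFinish (st : PySem.Dict String Int × Option String × Int) : PySem.Dict String Int :=
  match st.2.1 with
  | none => st.1
  | some p => st.1.insert p st.2.2

def separate_into_pairs_alt (word : String) : List (String × Int) :=
  let grams :=
    (PySem.List.pyRange 0 ((PySem.Str.len word : Int) - 1) 1).map
      (fun i => String.ofList (PySem.List.sorted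
        (PySem.List.slice word.toList (some i) (some (i + 2))) (fun c => c) false))
  let counts :=
    pvRleFinish ((PySem.List.sorted grams (fun g => g) false).foldl pvRleStep
      (PySem.Dict.empty, none, 0))
  -- counts[g]: every g ∈ grams is a key of counts, so getD with default 0 is exact
  (PySem.List.dedup grams).map (fun g => (g, counts.getD g 0))

-- ===== PRECONDITION & SPEC =====
def Spec_separate_into_pairs (word : String) (out : List (String × Int)) : Prop := out = separate_into_pairs_alt word
instance (word : String) (out : List (String × Int)) : Decidable (Spec_separate_into_pairs word out) := by unfold Spec_separate_into_pairs; infer_instance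

-- ===== CLAIM (what is proved, stated in full; the proofs are below) =====
def Claim_equal_separate_into_pairs : Prop := ∀ (word : String), Dom_separate_into_pairs word → Spec_separate_into_pairs word (separate_into_pairs word)

-- ===== LEMMAS AND PROOFS =====

-- A's membership-branching step is exactly the unconditional counter step.
theorem pv_step_eq {d : PySem.Dict String Int} {x : String} :
    (if d.contains x then d.modify x 0 (· + 1) else d.insert x 1) = d.modify x 0 (· + 1) := by
  by_cases h : d.contains x = true
  · simp [h]
  · simp only [Bool.not_eq_true] at h
    simp [h, PySem.Dict.modify, PySem.Dict.getD_of_not_contains (h := h)]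

theorem separate_into_pairs_eq_counter (word : String) :
    separate_into_pairs word =
      (PySem.Dict.counter
        ((PySem.List.pyRange 0 ((PySem.Str.len word : Int) - 1) 1).map
          (fun i => String.ofList (PySem.List.sorted
            (PySem.List.slice word.toList (some i) (some (i + 2))) (fun c => c) false)))).items := by
  unfold separate_into_pairs
  rw [PySem.Dict.counter_eq_foldl, List.foldl_map]
  simp only [pv_step_eq]

-- RLE invariant: in a run-length scan of a sorted list whose elements all dominate the
-- open run's element p, every lookup in the finished dict reads the total count.
theorem pv_rle_invariant (l : List String) :
    ∀ (c : PySem.Dict String Int) (p : String) (r : Int) (g : String),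
      l.Pairwise (· ≤ ·) → (∀ x ∈ l, p ≤ x) →
      (pvRleFinish (l.foldl pvRleStep (c, some p, r))).getD g 0 =
        if g = p then r + (l.count g : Int)
        else if g ∈ l then (l.count g : Int) else c.getD g 0 := by
  induction l with
  | nil =>
    intro c p r g _ _
    simp [pvRleFinish, PySem.Dict.getD_insert, List.count_nil]
  | cons a l ih =>
    intro c p r g hpw hge
    have hpl : l.Pairwise (· ≤ ·) := hpw.of_cons
    have hal : ∀ x ∈ l, a ≤ x := fun x hx => (List.pairwise_cons.mp hpw).1 x hx
    by_cases hap : a = p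
    · subst hap
      have hstep : pvRleStep (c, some a, r) a = (c, some a, r + 1) := by
        simp [pvRleStep]
      rw [List.foldl_cons, hstep, ih c a (r + 1) g hpl hal]
      by_cases hga : g = a
      · subst hga; simp; ring
      · have hag : a ≠ g := fun h => hga h.symm
        simp [hga, hag, List.mem_cons]
    · have hpa : p < a := lt_of_le_of_ne (hge a (List.mem_cons_self)) (Ne.symm hap)
      have hstep : pvRleStep (c, some p, r) a = (c.insert p r, some a, 1) := by
        simp [pvRleStep, show (a == p) = false by simp [hap]]
      have hpnl : p ∉ l := fun h => absurd (hal p h) (not_le.mpr hpa)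
      rw [List.foldl_cons, hstep, ih (c.insert p r) a 1 g hpl hal]
      by_cases hgp : g = p
      · subst hgp
        have hgna : g ≠ a := fun h => absurd h.symm hap
        have hgnl : g ∉ l := hpnl
        simp [hgna, hgnl, PySem.Dict.getD_insert_self,
          List.count_eq_zero.mpr hgnl, hap]
      · by_cases hga : g = a
        · subst hga
          simp [hgp]; ring
        · have : (c.insert p r).getD g 0 = c.getD g 0 := by
            simp [PySem.Dict.getD_insert, hgp]
          simp [hga, hgp, this, List.mem_cons,
            (show a ≠ g from fun h => hga h.symm)]

-- B's counts dict reads the full multiplicity of every bigram in the list.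
theorem pv_counts_getD (grams : List String) (g : String) (hg : g ∈ grams) :
    (pvRleFinish ((PySem.List.sorted grams (fun x => x) false).foldl pvRleStep
        (PySem.Dict.empty, none, 0))).getD g 0 = (grams.count g : Int) := by
  have hperm := PySem.List.sorted_perm grams (fun x => x) false
  have hcnt : (PySem.List.sorted grams (fun x => x) false).count g = grams.count g :=
    hperm.count_eq g
  have hpw : (PySem.List.sorted grams (fun x => x) false).Pairwise (· ≤ ·) :=
    PySem.List.sorted_pairwise grams (fun x => x)
  rcases hs : PySem.List.sorted grams (fun x => x) false with _ | ⟨a, t⟩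
  · exact absurd (hperm.mem_iff.mpr hg) (by simp [hs])
  · rw [hs] at hpw hcnt
    have hstep : pvRleStep (PySem.Dict.empty, none, 0) a = (PySem.Dict.empty, some a, 1) := by
      simp [pvRleStep]
    rw [List.foldl_cons, hstep,
      pv_rle_invariant t PySem.Dict.empty a 1 g hpw.of_cons
        (fun x hx => (List.pairwise_cons.mp hpw).1 x hx)]
    have hmem : g ∈ a :: t := by rw [← hs]; exact hperm.mem_iff.mpr hg
    by_cases hga : g = a
    · subst hga
      rw [← hcnt]; simp; ring
    · have hgt : g ∈ t := by rcases List.mem_cons.mp hmem with h | h; exact absurd h hga; exact h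
      rw [← hcnt]
      simp [hga, hgt, (show a ≠ g from fun h => hga h.symm)]

-- ===== VERDICT (by name: the statement is the Claim_ definition above) =====
theorem separate_into_pairs_spec : Claim_equal_separate_into_pairs := by
  intro word _
  unfold Spec_separate_into_pairs separate_into_pairs_alt
  rw [separate_into_pairs_eq_counter, PySem.Dict.items_counter]
  simp only [PySem.List.dedup_eq_ofList]
  refine List.map_congr_left (fun g hg => ?_)
  rw [pv_counts_getD _ g ((PySem.Set.mem_ofList _ _).mp hg)]
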